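-- pv_equiv track=rewrite | github.com/cfnnit/ydk-genisis-counter | main.py | aggregate_cards
-- ===== SOURCE A (Python) =====
-- def aggregate_cards(cards_list):
--     card_count = {}
--     for name, score in cards_list:
--         if name in card_count:
--             card_count[name]['count'] += 1
--             card_count[name]['total_score'] += score
--         else:
--             card_count[name] = {'count': 1, 'total_score': score, 'unit_score': score}
--
--     aggregated = []
--     for name, data in card_count.items():
--         if data['count'] > 1:
--             aggregated.append((f"{name} x{data['count']}", data['total_score'], data['unit_score']))
--         else:
--             aggregated.append((name, data['total_score'], data['unit_score']))
--
--     return aggregated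
-- ===== SOURCE B (Python) =====
-- def aggregate_cards(cards_list):
--     # No aggregation dict at all: take the distinct names in first-encounter
--     # order, then for each name rescan the whole list and reduce its scores
--     # (count = len, total = sum, unit = first).
--     names = list(dict.fromkeys(name for name, _ in cards_list))
--     aggregated = []
--     for name in names:
--         scores = [s for n, s in cards_list if n == name]
--         count = len(scores)
--         total = sum(scores)
--         label = f"{name} x{count}" if count > 1 else name
--         aggregated.append((label, total, scores[0]))
--     return aggregated
-- ===== Notes on version B (the rewrite author's own statement) =====
-- stated objective: alternative
-- what changed: B drops A's aggregation dict entirely: it lists the distinct names in first-encounter order (dict.fromkeys) and for each name rescans the whole input, reducing the filtered scores with len/sum/first (O(n*k) nested scans instead of A's single-pass hash aggregation).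
import Mathlib
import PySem

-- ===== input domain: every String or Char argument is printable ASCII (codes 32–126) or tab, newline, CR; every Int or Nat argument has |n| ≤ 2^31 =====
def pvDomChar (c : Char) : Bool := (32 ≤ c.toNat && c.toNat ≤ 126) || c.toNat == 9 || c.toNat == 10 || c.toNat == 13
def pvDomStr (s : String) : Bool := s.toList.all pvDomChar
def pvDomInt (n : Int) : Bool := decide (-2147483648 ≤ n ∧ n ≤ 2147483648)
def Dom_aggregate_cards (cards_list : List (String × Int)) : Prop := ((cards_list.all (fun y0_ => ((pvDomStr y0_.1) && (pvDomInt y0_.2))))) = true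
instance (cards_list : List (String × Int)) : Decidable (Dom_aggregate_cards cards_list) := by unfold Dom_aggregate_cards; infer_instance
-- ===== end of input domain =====

-- B drops the aggregation dict: it lists distinct names in first-encounter order and,
-- per name, rescans the input reducing the filtered scores (len/sum/first); alternative algorithm, not faster.


-- ===== PORT A =====
-- loop body of A's first loop: in-place field updates become an overwriting insert (keeps position)
def pvStepA (d : PySem.Dict String (Int × Int × Int)) (p : String × Int) :
    PySem.Dict String (Int × Int × Int) :=
  if d.contains p.1 then
    let v := d.getD p.1 (0, 0, 0)
    d.insert p.1 (v.1 + 1, v.2.1 + p.2, v.2.2)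
  else
    d.insert p.1 (1, p.2, p.2)

def aggregate_cards (cards_list : List (String × Int)) : List (String × Int × Int) :=
  let card_count := cards_list.foldl pvStepA PySem.Dict.empty
  card_count.items.foldl (fun acc q =>
    if q.2.1 > 1 then
      acc ++ [(q.1 ++ " x" ++ PySem.Int.toStr q.2.1, q.2.2.1, q.2.2.2)]
    else
      acc ++ [(q.1, q.2.2.1, q.2.2.2)]) []

-- ===== PORT B =====
-- list(dict.fromkeys(...)) = PySem.List.dedup; the per-name comprehension is filter + map;
-- scores[0] is PySem.List.pyGetD (scores is nonempty for every name in names, so no IndexError).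
def aggregate_cards_alt (cards_list : List (String × Int)) : List (String × Int × Int) :=
  let names := PySem.List.dedup (cards_list.map Prod.fst)
  names.foldl (fun acc name =>
    let scores := (cards_list.filter (fun p => p.1 == name)).map (·.2)
    let count : Int := (scores.length : Int)
    let total : Int := scores.sum
    let label : String := if count > 1 then name ++ " x" ++ PySem.Int.toStr count else name
    acc ++ [(label, total, PySem.List.pyGetD scores 0 0)]) []

-- ===== PRECONDITION & SPEC =====
def Spec_aggregate_cards (cards_list : List (String × Int)) (out : List (String × Int × Int)) : Prop := out = aggregate_cards_alt cards_list
instance (cards_list : List (String × Int)) (out : List (String × Int × Int)) : Decidable (Spec_aggregate_cards cards_list out) := by unfold Spec_aggregate_cards; infer_instance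

-- ===== CLAIM (what is proved, stated in full; the proofs are below) =====
def Claim_equal_aggregate_cards : Prop := ∀ (cards_list : List (String × Int)), Dom_aggregate_cards cards_list → Spec_aggregate_cards cards_list (aggregate_cards cards_list)

-- ===== LEMMAS AND PROOFS =====

-- running aggregate over a score list, from an arbitrary start
def pvAgg (v : Int × Int × Int) (ss : List Int) : Int × Int × Int :=
  ss.foldl (fun v s => (v.1 + 1, v.2.1 + s, v.2.2)) v

lemma pvAgg_closed (v : Int × Int × Int) (ss : List Int) :
    pvAgg v ss = (v.1 + ss.length, v.2.1 + ss.sum, v.2.2) := by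
  induction ss generalizing v with
  | nil => simp [pvAgg]
  | cons s r ih =>
    simp only [pvAgg, List.foldl_cons] at *
    rw [ih]
    simp
    constructor
    · ring
    · ring

def pvAggOpt (o : Option (Int × Int × Int)) (ss : List Int) : Option (Int × Int × Int) :=
  match o, ss with
  | some v, ss => some (pvAgg v ss)
  | none, [] => none
  | none, s :: r => some (pvAgg (1, s, s) r)

lemma pvStepA_eq_insert :
    pvStepA = fun d p => d.insert p.1
      (if d.contains p.1 then
        let v := d.getD p.1 (0, 0, 0); (v.1 + 1, v.2.1 + p.2, v.2.2)
       else (1, p.2, p.2)) := by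
  funext d p
  unfold pvStepA
  split_ifs <;> rfl

lemma pvFoldA_get? (l : List (String × Int)) (d : PySem.Dict String (Int × Int × Int)) (name : String) :
    (l.foldl pvStepA d).get? name
      = pvAggOpt (d.get? name) ((l.filter (fun p => p.1 == name)).map (·.2)) := by
  induction l generalizing d with
  | nil => cases h : d.get? name <;> simp [pvAggOpt, pvAgg, h]
  | cons p l ih =>
    simp only [List.foldl_cons, List.filter_cons]
    rw [ih]
    by_cases hp : p.1 = name
    · subst hp
      simp only [beq_self_eq_true, if_pos, List.map_cons]
      cases hc : d.get? p.1 with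
      | some v =>
        have hcon : d.contains p.1 = true := by
          rw [PySem.Dict.contains_eq_isSome_get?, hc]; rfl
        have hgd : d.getD p.1 (0,0,0) = v := by simp [PySem.Dict.getD_eq_get?_getD, hc]
        simp only [pvStepA, hcon, if_pos, hgd, PySem.Dict.get?_insert_self, pvAggOpt, pvAgg,
          List.foldl_cons]
      | none =>
        have hcon : d.contains p.1 = false := by
          rw [PySem.Dict.contains_eq_isSome_get?, hc]; rfl
        simp only [pvStepA, hcon, Bool.false_eq_true, if_neg, not_false_iff,
          PySem.Dict.get?_insert_self, pvAggOpt, pvAgg]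
    · have hb : (p.1 == name) = false := beq_eq_false_iff_ne.mpr hp
      rw [hb]
      simp only [Bool.false_eq_true, if_neg, not_false_iff]
      have : (pvStepA d p).get? name = d.get? name := by
        rw [pvStepA_eq_insert]
        exact PySem.Dict.get?_insert_of_ne _ _ (fun h => hp h.symm)
      rw [this]

lemma pvKeysA (l : List (String × Int)) :
    (l.foldl pvStepA PySem.Dict.empty).keys = PySem.List.dedup (l.map Prod.fst) := by
  rw [pvStepA_eq_insert, PySem.Dict.keys_foldl_insert_key, PySem.List.dedup_eq_ofList]
  simp [PySem.Set.update, PySem.Set.ofList_eq_foldl, PySem.Dict.keys_empty]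

theorem aggregate_cards_spec : Claim_equal_aggregate_cards := by
  unfold Claim_equal_aggregate_cards Spec_aggregate_cards
  intro l _
  simp only [aggregate_cards, aggregate_cards_alt]
  set dA := l.foldl pvStepA PySem.Dict.empty with hdA
  have hndA : dA.keys.Nodup := by
    rw [hdA, pvStepA_eq_insert]
    exact PySem.Dict.nodup_keys_foldl_insert_key l _ _ _ PySem.Dict.nodup_keys_empty
  -- rewrite both append-folds as maps
  have hsplit : (fun (acc : List (String × Int × Int)) (q : String × (Int × Int × Int)) =>
      if q.2.1 > 1 then acc ++ [(q.1 ++ " x" ++ PySem.Int.toStr q.2.1, q.2.2.1, q.2.2.2)]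
      else acc ++ [(q.1, q.2.2.1, q.2.2.2)])
      = fun acc q => acc ++ [if q.2.1 > 1 then (q.1 ++ " x" ++ PySem.Int.toStr q.2.1, q.2.2.1, q.2.2.2)
        else (q.1, q.2.2.1, q.2.2.2)] := by
    funext acc q; split_ifs <;> rfl
  rw [hsplit, PySem.List.foldl_append_singleton_eq_map, PySem.List.foldl_append_singleton_eq_map]
  rw [PySem.Dict.items_eq_map_keys dA hndA (0,0,0), List.map_map, pvKeysA]
  simp only [List.nil_append]
  apply List.map_congr_left
  intro name hmem
  -- name occurs in l, so the filtered score list is nonempty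
  have hfl : ∃ s r, (l.filter (fun p => p.1 == name)).map (·.2) = s :: r := by
    have hA' : name ∈ l.map Prod.fst := (PySem.List.mem_dedup _ _).mp hmem
    rcases List.mem_map.mp hA' with ⟨p, hpl, hpn⟩
    have hm : p.2 ∈ (l.filter (fun p => p.1 == name)).map (·.2) :=
      List.mem_map_of_mem (List.mem_filter.mpr ⟨hpl, by simp [hpn]⟩)
    cases hc2 : (l.filter (fun p => p.1 == name)).map (·.2) with
    | nil => rw [hc2] at hm; cases hm
    | cons s r => exact ⟨s, r, rfl⟩
  rcases hfl with ⟨s, r, hsr⟩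
  have hgA : dA.getD name (0,0,0) = (1 + (r.length : Int), s + r.sum, s) := by
    rw [PySem.Dict.getD_eq_get?_getD, hdA, pvFoldA_get? l PySem.Dict.empty name,
      PySem.Dict.get?_empty, hsr]
    simp [pvAggOpt, pvAgg_closed]
  simp only [Function.comp, hgA, hsr]
  have hlen : ((s :: r).length : Int) = 1 + (r.length : Int) := by rw [List.length_cons]; push_cast; ring
  have hunit : PySem.List.pyGetD (s :: r) 0 0 = s := by
    simp [PySem.List.pyGetD, PySem.List.pyGet?, PySem.List.pyIdx?]
  have hsum : (s :: r).sum = s + r.sum := by simp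
  simp only [hlen, hunit, hsum]
  by_cases hgt : (1 : Int) + (r.length : Int) > 1
  · simp [hgt]
  · simp [hgt]
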